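-- pv_equiv track=rewrite | github.com/Fukoros/Corgi | 2. Compute the similarity between Properties/Token/Compute similarity.py | connected_to_natural
-- ===== SOURCE A (Python) =====
-- def connected_to_natural(x):
--     res = ""
--     len_x = len(x)
--     for i, carac in enumerate(x):
--         if (i >= 1) and (i<(len_x-1)) and (ord(carac)>=ord("A")) and (ord(carac)<=ord("Z")) and (ord(x[i+1])>=ord("a")) and (ord(x[i+1])<=ord("z")):
--             res+=" "+carac
--         else:
--             res+=carac
--     return res
-- ===== SOURCE B (Python) =====
-- def connected_to_natural(x):
--     n = len(x)
--     cuts = [i for i in range(1, n - 1) if "A" <= x[i] <= "Z" and "a" <= x[i + 1] <= "z"]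
--     return " ".join(x[a:b] for a, b in zip([0] + cuts, cuts + [n]))
-- ===== Notes on version B (the rewrite author's own statement) =====
-- stated objective: alternative
-- what changed: Instead of emitting output character by character in an enumerate loop with string concatenation, B first computes the list of boundary indices (uppercase followed by lowercase, interior positions only), then slices the string into segments at those boundaries and joins the segments with a single-space separator via str.join.
import Mathlib
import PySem

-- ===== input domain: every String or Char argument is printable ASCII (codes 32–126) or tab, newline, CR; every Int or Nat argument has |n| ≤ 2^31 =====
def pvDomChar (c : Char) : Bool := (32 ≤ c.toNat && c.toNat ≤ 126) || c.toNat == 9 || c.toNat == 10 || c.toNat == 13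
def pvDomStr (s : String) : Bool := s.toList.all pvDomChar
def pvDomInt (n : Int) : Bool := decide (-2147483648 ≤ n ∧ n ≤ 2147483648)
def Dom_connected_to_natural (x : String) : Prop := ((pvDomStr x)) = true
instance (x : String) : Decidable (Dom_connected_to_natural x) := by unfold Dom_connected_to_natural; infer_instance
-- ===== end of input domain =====

-- B restructures A: instead of emitting the output character by character, it first
-- computes the list of boundary indices and then slices the string into segments
-- joined with a single-space separator (staged passes; measured faster by a constant factor).

-- ===== PORT A =====
-- literal port of A: foldl over enumerate, accumulating the result characters;
-- ord-range tests kept as Nat comparisons on Char.toNat (exact for ASCII and beyond)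
def connected_to_natural (x : String) : String :=
  let cs := x.toList
  let len_x : Int := (cs.length : Int)
  let res := (PySem.List.enumerate cs 0).foldl (fun (res : List Char) (p : Int × Char) =>
    if (decide (1 ≤ p.1) && decide (p.1 < len_x - 1) &&
        decide ('A'.toNat ≤ p.2.toNat) && decide (p.2.toNat ≤ 'Z'.toNat) &&
        (match PySem.List.pyGet? cs (p.1 + 1) with
         | some n => decide ('a'.toNat ≤ n.toNat) && decide (n.toNat ≤ 'z'.toNat)
         | none => false)) = true
    then res ++ [' ', p.2] else res ++ [p.2]) ([] : List Char)
  String.ofList res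

-- ===== PORT B =====
-- literal port of B: cuts = [i for i in range(1, n-1) if 'A'<=x[i]<='Z' and 'a'<=x[i+1]<='z'],
-- then " ".join of the slices x[a:b] between consecutive boundaries.
-- x[i] / x[i+1] are ported with pyGet? (for i in range(1, n-1) both are always in range,
-- so the none branch is unreachable and the port is exact).
def connected_to_natural_alt (x : String) : String :=
  let cs := x.toList
  let n : Int := (cs.length : Int)
  let cuts := (PySem.List.pyRange 1 (n - 1) 1).filter (fun i =>
    match PySem.List.pyGet? cs i, PySem.List.pyGet? cs (i + 1) with
    | some c, some d => decide ('A'.toNat ≤ c.toNat) && decide (c.toNat ≤ 'Z'.toNat) &&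
                        (decide ('a'.toNat ≤ d.toNat) && decide (d.toNat ≤ 'z'.toNat))
    | _, _ => false)
  let parts := (List.zip ((0 : Int) :: cuts) (cuts ++ [n])).map
    (fun p => PySem.List.slice cs (some p.1) (some p.2))
  String.ofList (PySem.Chars.join [' '] parts)

-- ===== PRECONDITION & SPEC =====
def Spec_connected_to_natural (x : String) (out : String) : Prop := out = connected_to_natural_alt x
instance (x : String) (out : String) : Decidable (Spec_connected_to_natural x out) := by unfold Spec_connected_to_natural; infer_instance

-- ===== CLAIM (what is proved, stated in full; the proofs are below) =====
def Claim_equal_connected_to_natural : Prop := ∀ (x : String), Dom_connected_to_natural x → Spec_connected_to_natural x (connected_to_natural x)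

-- ===== LEMMAS AND PROOFS =====

-- whether a space is inserted before c (uppercase c followed by lowercase n)
def pvCond (c n : Char) : Bool :=
  'A'.toNat ≤ c.toNat && c.toNat ≤ 'Z'.toNat && ('a'.toNat ≤ n.toNat && n.toNat ≤ 'z'.toNat)

-- the same condition read at a position of the string (false at/after the last index)
def pvCondAt (cs : List Char) (i : Nat) : Bool :=
  match cs[i]?, cs[i+1]? with
  | some c, some d => pvCond c d
  | _, _ => false

-- the common local recursion both programs compute on the tail of the string
def pvGo : List Char → List Char
  | [] => []
  | [c] => [c]
  | c :: n :: t => (if pvCond c n then [' ', c] else [c]) ++ pvGo (n :: t)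

-- ===== A-side characterisation: A = c0 :: pvGo rest =====

-- A's flatMap body, over the whole character list cs
def pvA (cs : List Char) (p : Int × Char) : List Char :=
  if (decide (1 ≤ p.1) && decide (p.1 < (cs.length : Int) - 1) &&
      decide ('A'.toNat ≤ p.2.toNat) && decide (p.2.toNat ≤ 'Z'.toNat) &&
      (match PySem.List.pyGet? cs (p.1 + 1) with
       | some n => decide ('a'.toNat ≤ n.toNat) && decide (n.toNat ≤ 'z'.toNat)
       | none => false)) = true
  then [' ', p.2] else [p.2]

theorem pvFold (cs init : List Char) :
    (PySem.List.enumerate cs 0).foldl (fun (res : List Char) (p : Int × Char) =>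
      if (decide (1 ≤ p.1) && decide (p.1 < (cs.length : Int) - 1) &&
          decide ('A'.toNat ≤ p.2.toNat) && decide (p.2.toNat ≤ 'Z'.toNat) &&
          (match PySem.List.pyGet? cs (p.1 + 1) with
           | some n => decide ('a'.toNat ≤ n.toNat) && decide (n.toNat ≤ 'z'.toNat)
           | none => false)) = true
      then res ++ [' ', p.2] else res ++ [p.2]) init
    = init ++ (PySem.List.enumerate cs 0).flatMap (pvA cs) := by
  have hbody : (fun (res : List Char) (p : Int × Char) =>
      if (decide (1 ≤ p.1) && decide (p.1 < (cs.length : Int) - 1) &&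
          decide ('A'.toNat ≤ p.2.toNat) && decide (p.2.toNat ≤ 'Z'.toNat) &&
          (match PySem.List.pyGet? cs (p.1 + 1) with
           | some n => decide ('a'.toNat ≤ n.toNat) && decide (n.toNat ≤ 'z'.toNat)
           | none => false)) = true
      then res ++ [' ', p.2] else res ++ [p.2])
      = (fun res p => res ++ pvA cs p) := by
    funext res p; unfold pvA; split <;> split <;> rfl
  rw [hbody, PySem.List.foldl_append_eq_flatMap]

theorem pvA_enum (cs : List Char) : ∀ (l : List Char) (k : Nat), 1 ≤ k → cs.drop k = l →
    (PySem.List.enumerate l (k : Int)).flatMap (pvA cs) = pvGo l := by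
  intro l
  induction l with
  | nil => intro k _ _; simp [PySem.List.enumerate_nil, pvGo]
  | cons c t ih =>
    intro k hk hdrop
    have hlenNat : cs.length - k = t.length + 1 := by
      have := congrArg List.length hdrop
      rwa [List.length_drop, List.length_cons] at this
    have hklen : k < cs.length := by omega
    have hget : PySem.List.pyGet? cs ((k : Int) + 1) = t.head? := by
      rw [show ((k : Int) + 1) = ((k + 1 : Nat) : Int) by push_cast; ring,
          PySem.List.pyGet?_natCast]
      have h1 : cs[k + 1]? = (cs.drop k)[1]? := by
        rw [List.getElem?_drop]
      rw [h1, hdrop]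
      cases t <;> rfl
    rw [PySem.List.enumerate_cons, List.flatMap_cons]
    cases t with
    | nil =>
      have hc : pvA cs ((k : Int), c) = [c] := by
        unfold pvA
        simp only [List.length_nil] at hlenNat
        have hno : ¬ ((k : Int) < (cs.length : Int) - 1) := by omega
        simp [hno]
      simp [PySem.List.enumerate_nil, hc, pvGo]
    | cons n t' =>
      have hA : pvA cs ((k : Int), c) = (if pvCond c n then [' ', c] else [c]) := by
        unfold pvA
        rw [hget]
        simp only [List.length_cons] at hlenNat
        have h1 : decide (1 ≤ (k : Int)) = true := by simp; omega
        have h2 : decide ((k : Int) < (cs.length : Int) - 1) = true := by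
          simp only [decide_eq_true_eq]; omega
        simp only [List.head?_cons, h1, h2, Bool.true_and]
        unfold pvCond
        rfl
      have hdrop' : cs.drop (k + 1) = n :: t' := by
        have hd : cs.drop (k + 1) = (cs.drop k).drop 1 := by
          rw [List.drop_drop]
        rw [hd, hdrop]; rfl
      rw [hA, show ((k : Int) + 1) = ((k + 1 : Nat) : Int) by push_cast; ring,
          ih (k + 1) (by omega) hdrop']
      rfl

theorem pvA_eq (x : String) : (connected_to_natural x).toList =
    match x.toList with
    | [] => []
    | c0 :: rest => c0 :: pvGo rest := by
  unfold connected_to_natural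
  simp only [String.toList_ofList]
  rw [pvFold]
  cases hx : x.toList with
  | nil => simp [PySem.List.enumerate_nil]
  | cons c0 rest =>
    rw [PySem.List.enumerate_cons, List.flatMap_cons]
    have h0 : pvA (c0 :: rest) (0, c0) = [c0] := by unfold pvA; simp
    rw [h0, show (0 : Int) + 1 = ((1 : Nat) : Int) by norm_num,
        pvA_enum (c0 :: rest) rest 1 (le_refl 1) (by simp)]
    simp

-- ===== B-side characterisation =====

-- the segment cs[a:b] with natural bounds
def pvSeg (cs : List Char) (a b : Nat) : List Char := (cs.drop a).take (b - a)

-- join of the segments at the cut positions, written as the recursion the zip produces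
def pvJ (cs : List Char) (a : Nat) : List Nat → List Char
  | [] => pvSeg cs a cs.length
  | c :: rest => pvSeg cs a c ++ ' ' :: pvJ cs c rest

-- the cut positions from index b on (interior positions only: up to cs.length - 2)
def pvCuts (cs : List Char) (b : Nat) : List Nat :=
  (List.range' b (cs.length - 1 - b)).filter (pvCondAt cs)

-- per-position emission from index a on (what pvGo computes, indexed)
def pvEmit (cs : List Char) (a : Nat) : List Char :=
  if h : a < cs.length then
    (if pvCondAt cs a then [' ', cs[a]] else [cs[a]]) ++ pvEmit cs (a + 1)
  else []
termination_by cs.length - a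

theorem pvEmit_of_lt (cs : List Char) (a : Nat) (h : a < cs.length) :
    pvEmit cs a = (if pvCondAt cs a then [' ', cs[a]] else [cs[a]]) ++ pvEmit cs (a + 1) := by
  rw [pvEmit]; simp [h]

theorem pvEmit_of_ge (cs : List Char) (a : Nat) (h : cs.length ≤ a) :
    pvEmit cs a = [] := by
  rw [pvEmit]; simp [Nat.not_lt.mpr h]

theorem pvCondAt_last (cs : List Char) (a : Nat) (h : cs.length ≤ a + 1) :
    pvCondAt cs a = false := by
  unfold pvCondAt
  have : cs[a+1]? = none := by
    rw [List.getElem?_eq_none_iff]; omega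
  rw [this]
  cases cs[a]? <;> rfl

-- pvEmit agrees with pvGo on the corresponding suffix
theorem pvEmit_eq_pvGo (cs : List Char) : ∀ (l : List Char) (a : Nat), cs.drop a = l →
    pvEmit cs a = pvGo l := by
  intro l
  induction l with
  | nil =>
    intro a hdrop
    have : cs.length ≤ a := by
      have := congrArg List.length hdrop
      simp only [List.length_drop, List.length_nil] at this
      omega
    rw [pvEmit_of_ge cs a this]; rfl
  | cons c t ih =>
    intro a hdrop
    have hlenNat : cs.length - a = t.length + 1 := by
      have := congrArg List.length hdrop
      rwa [List.length_drop, List.length_cons] at this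
    have ha : a < cs.length := by omega
    have hget : cs[a] = c := by
      have := List.drop_eq_getElem_cons ha
      rw [hdrop] at this
      exact (List.cons.injEq _ _ _ _ ▸ this).1.symm
    have hdrop' : cs.drop (a + 1) = t := by
      have := List.drop_eq_getElem_cons ha
      rw [hdrop, hget] at this
      exact (List.cons.injEq _ _ _ _ ▸ this).2.symm
    have hcond : pvCondAt cs a = (match t.head? with
        | some d => pvCond c d
        | none => false) := by
      unfold pvCondAt
      have h0 : cs[a]? = some c := by rw [List.getElem?_eq_getElem ha, hget]
      have h1 : cs[a+1]? = t.head? := by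
        rw [show cs[a+1]? = (cs.drop (a+1))[0]? by rw [List.getElem?_drop], hdrop']
        cases t <;> rfl
      rw [h0, h1]
      cases t <;> rfl
    rw [pvEmit_of_lt cs a ha, ih (a + 1) hdrop', hget, hcond]
    cases t with
    | nil => simp [pvGo]
    | cons n t' => simp only [List.head?_cons, pvGo]; rfl

theorem pvSeg_cons (cs : List Char) (a b : Nat) (hab : a < b) (ha : a < cs.length) :
    pvSeg cs a b = cs[a] :: pvSeg cs (a + 1) b := by
  unfold pvSeg
  rw [List.drop_eq_getElem_cons ha, show b - a = (b - (a + 1)) + 1 by omega, List.take_succ_cons]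

theorem pvSeg_to_length (cs : List Char) (a : Nat) :
    pvSeg cs a cs.length = cs.drop a := by
  unfold pvSeg
  apply List.take_of_length_le
  simp

-- shifting the left edge of the first segment past one character
theorem pvJ_shift (cs : List Char) (a : Nat) (ha : a < cs.length)
    (cuts : List Nat) (hcuts : ∀ c ∈ cuts, a < c) :
    pvJ cs a cuts = cs[a] :: pvJ cs (a + 1) cuts := by
  cases cuts with
  | nil =>
    simp only [pvJ]
    exact pvSeg_cons cs a cs.length ha ha
  | cons c rest =>
    simp only [pvJ]
    rw [pvSeg_cons cs a c (hcuts c (by simp)) ha]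
    rfl

-- the main induction: join-of-segments at the cuts from a+1 equals per-position emission
theorem pvJ_cuts (cs : List Char) : ∀ (k a : Nat), cs.length - a ≤ k → (ha : a < cs.length) →
    pvJ cs a (pvCuts cs (a + 1)) = cs[a] :: pvEmit cs (a + 1) := by
  intro k
  induction k with
  | zero => intro a hk ha; omega
  | succ k ih =>
    intro a hk ha
    by_cases hsmall : cs.length ≤ a + 2
    · -- no interior positions from a+1 on: cuts empty, at most one more char
      have hc : pvCuts cs (a + 1) = [] := by
        unfold pvCuts
        rw [show cs.length - 1 - (a + 1) = 0 by omega]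
        rfl
      rw [hc]
      simp only [pvJ]
      rw [pvSeg_to_length, List.drop_eq_getElem_cons ha]
      congr 1
      by_cases h1 : a + 1 < cs.length
      · rw [pvEmit_of_lt cs (a + 1) h1, pvCondAt_last cs (a + 1) (by omega),
            pvEmit_of_ge cs (a + 2) (by omega)]
        simp only [if_neg (by simp : ¬ (false = true))]
        rw [List.drop_eq_getElem_cons h1, List.drop_eq_nil_of_le (by omega : cs.length ≤ a + 2)]
        rfl
      · rw [pvEmit_of_ge cs (a + 1) (by omega), List.drop_eq_nil_of_le (by omega)]
    · -- a + 1 is an interior position: peel it off the range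
      have h1 : a + 1 < cs.length := by omega
      have hrange : List.range' (a + 1) (cs.length - 1 - (a + 1))
          = (a + 1) :: List.range' (a + 2) (cs.length - 1 - (a + 2)) := by
        rw [show cs.length - 1 - (a + 1) = (cs.length - 1 - (a + 2)) + 1 by omega,
            List.range'_succ]
      by_cases hcond : pvCondAt cs (a + 1) = true
      · have hc : pvCuts cs (a + 1) = (a + 1) :: pvCuts cs (a + 2) := by
          unfold pvCuts
          rw [hrange, List.filter_cons, if_pos hcond]
        rw [hc]
        simp only [pvJ]
        rw [ih (a + 1) (by omega) h1,
            pvSeg_cons cs a (a + 1) (by omega) ha,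
            show pvSeg cs (a + 1) (a + 1) = [] by unfold pvSeg; simp,
            pvEmit_of_lt cs (a + 1) h1, if_pos hcond]
        rfl
      · have hc : pvCuts cs (a + 1) = pvCuts cs (a + 2) := by
          unfold pvCuts
          rw [hrange, List.filter_cons, if_neg hcond]
        rw [hc,
            pvJ_shift cs a ha (pvCuts cs (a + 2)) (by
              intro c hcmem
              unfold pvCuts at hcmem
              have := List.mem_range'_1.mp (List.mem_of_mem_filter hcmem)
              omega),
            ih (a + 1) (by omega) h1,
            pvEmit_of_lt cs (a + 1) h1, if_neg hcond]
        rfl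

-- bridge: the port's Int-level cuts are the Nat-level pvCuts, mapped through the cast
theorem pvCuts_cast (cs : List Char) :
    (PySem.List.pyRange 1 ((cs.length : Int) - 1) 1).filter (fun i =>
      match PySem.List.pyGet? cs i, PySem.List.pyGet? cs (i + 1) with
      | some c, some d => decide ('A'.toNat ≤ c.toNat) && decide (c.toNat ≤ 'Z'.toNat) &&
                          (decide ('a'.toNat ≤ d.toNat) && decide (d.toNat ≤ 'z'.toNat))
      | _, _ => false)
    = (pvCuts cs 1).map (Nat.cast) := by
  have hrange : PySem.List.pyRange 1 ((cs.length : Int) - 1) 1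
      = (List.range' 1 (cs.length - 1 - 1)).map (Nat.cast) := by
    rw [PySem.List.pyRange_one, List.range'_eq_map_range]
    rw [List.map_map]
    have : ((cs.length : Int) - 1 - 1).toNat = cs.length - 1 - 1 := by omega
    rw [this]
    apply List.map_congr_left
    intro k _
    simp
  rw [hrange, List.filter_map]
  unfold pvCuts
  congr 1
  apply List.filter_congr
  intro i _
  simp only [Function.comp_apply]
  rw [show ((i : Int) + 1) = ((i + 1 : Nat) : Int) by push_cast; ring,
      PySem.List.pyGet?_natCast, PySem.List.pyGet?_natCast]
  unfold pvCondAt pvCond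
  cases cs[i]? <;> cases cs[i+1]? <;> simp

-- bridge: the port's join-over-zip equals pvJ (any nat cut list)
theorem pvJoin_cast (cs : List Char) : ∀ (cuts : List Nat) (a : Nat),
    PySem.Chars.join [' ']
      ((List.zip ((a : Int) :: cuts.map Nat.cast) (cuts.map Nat.cast ++ [(cs.length : Int)])).map
        (fun p => PySem.List.slice cs (some p.1) (some p.2)))
    = pvJ cs a cuts := by
  intro cuts
  induction cuts with
  | nil =>
    intro a
    simp only [List.map_nil, List.nil_append, List.zip_cons_cons, List.zip_nil_right,
      List.map_cons, List.map_nil]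
    rw [PySem.List.slice_natCast, PySem.Chars.join_singleton]
    rfl
  | cons c rest ih =>
    intro a
    have hih := ih c
    cases rest with
    | nil =>
      simp only [List.map_nil, List.nil_append, List.zip_cons_cons, List.zip_nil_right,
        List.map_cons, List.map_nil, List.cons_append] at hih ⊢
      rw [PySem.List.slice_natCast, PySem.List.slice_natCast,
          PySem.Chars.join_cons_cons, PySem.Chars.join_singleton]
      simp only [pvJ, pvSeg]
      simp
    | cons r rest' =>
      simp only [List.map_cons, List.cons_append, List.zip_cons_cons, List.map_cons] at hih ⊢
      rw [PySem.List.slice_natCast, PySem.Chars.join_cons_cons, hih]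
      simp [pvJ, pvSeg]

theorem pvB_eq (x : String) : (connected_to_natural_alt x).toList =
    match x.toList with
    | [] => []
    | c0 :: rest => c0 :: pvGo rest := by
  unfold connected_to_natural_alt
  simp only [String.toList_ofList]
  rw [pvCuts_cast, show ((0 : Int) :: (pvCuts x.toList 1).map Nat.cast)
        = ((0 : Nat) : Int) :: (pvCuts x.toList 1).map Nat.cast by norm_num,
      pvJoin_cast x.toList (pvCuts x.toList 1) 0]
  cases hx : x.toList with
  | nil =>
    have : pvCuts ([] : List Char) 1 = [] := by unfold pvCuts; rfl
    rw [this]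
    simp [pvJ, pvSeg]
  | cons c0 rest =>
    have h0 : (0 : Nat) < (c0 :: rest).length := by simp
    rw [show (1 : Nat) = 0 + 1 by rfl,
        pvJ_cuts (c0 :: rest) (c0 :: rest).length 0 (by omega) h0]
    congr 1
    exact pvEmit_eq_pvGo (c0 :: rest) rest 1 (by simp)

-- ===== VERDICT (by name: the statement is the Claim_ definition above) =====
theorem connected_to_natural_spec : Claim_equal_connected_to_natural := by
  intro x _
  unfold Spec_connected_to_natural
  exact String.toList_inj.mp ((pvA_eq x).trans (pvB_eq x).symm)
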